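-- pv_equiv track=rewrite | github.com/alt-law/dre-downloader | dre_downloader.py | csv_to_list
-- ===== SOURCE A (Python) =====
-- def csv_to_list(string):
--     """ converts a string of csv to a list of strings """
--     tail = head = 0
--     lst = []
--     while head < len(string):
--         if string[head] != ',':
--             head += 1
--         else:
--             lst.append(string[tail+1:head])
--             tail = head + 1 # to discount for the " " after the comma
--             head = head + 1
--     lst.append(string[tail+1:head-1])
--
--     return lst
-- ===== SOURCE B (Python) =====
-- def csv_to_list(string):
--     """ converts a string of csv to a list of strings """
--     def trim(parts):
--         if len(parts) == 1:
--             return [parts[0][1:-1]]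
--         return [parts[0][1:]] + trim(parts[1:])
--     return trim(string.split(','))
-- ===== Notes on version B (the rewrite author's own statement) =====
-- stated objective: simpler
-- what changed: Replaced A's manual index-tracking while-loop character scan with a single library comma-split followed by a recursive trimming pass (drop the first char of every field, and also the last char of the final field).
import Mathlib
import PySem

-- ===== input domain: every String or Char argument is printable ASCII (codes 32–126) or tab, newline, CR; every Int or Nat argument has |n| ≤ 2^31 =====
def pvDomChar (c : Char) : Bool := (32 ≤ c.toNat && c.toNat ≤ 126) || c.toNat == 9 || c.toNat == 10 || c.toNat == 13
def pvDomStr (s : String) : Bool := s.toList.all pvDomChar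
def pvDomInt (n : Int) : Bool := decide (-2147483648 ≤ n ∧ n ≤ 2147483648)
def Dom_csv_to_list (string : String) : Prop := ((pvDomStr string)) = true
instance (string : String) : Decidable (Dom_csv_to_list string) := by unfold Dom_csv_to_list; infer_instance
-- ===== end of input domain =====

-- B replaces A's manual index-tracking comma scan by split(',') plus a recursive
-- trimming pass over the parts; same return value, different decomposition (measured faster by a constant factor: C-level split vs per-char Python loop).


-- ===== PORT A =====
-- the while-loop of A: state (tail, head, lst); indices stay ≥ 0, kept as Nat,
-- cast to Int at each slice exactly where Python slices
def csvLoop (s : List Char) (tl hd : Nat) (lst : List String) : List String :=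
  if h : hd < s.length then
    if s[hd] ≠ ',' then
      csvLoop s tl (hd + 1) lst
    else
      csvLoop s (hd + 1) (hd + 1)
        (lst ++ [String.ofList (PySem.List.slice s (some ((tl : Int) + 1)) (some (hd : Int)))])
  else
    lst ++ [String.ofList (PySem.List.slice s (some ((tl : Int) + 1)) (some ((hd : Int) - 1)))]
termination_by s.length - hd
decreasing_by all_goals omega

def csv_to_list (string : String) : List String :=
  csvLoop string.toList 0 0 []

-- ===== PORT B =====
-- trim: parts[0][1:-1] if single part, else parts[0][1:] consed on trim of the rest
def trimParts : List (List Char) → List String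
  | [] => []  -- unreachable: split always returns at least one part
  | [p] => [String.ofList (PySem.List.slice p (some 1) (some (-1)))]
  | p :: q :: rest =>
      String.ofList (PySem.List.slice p (some 1) none) :: trimParts (q :: rest)

def csv_to_list_alt (string : String) : List String :=
  trimParts (PySem.Chars.splitOn string.toList [','])

-- ===== PRECONDITION & SPEC =====
def Spec_csv_to_list (string : String) (out : List String) : Prop := out = csv_to_list_alt string
instance (string : String) (out : List String) : Decidable (Spec_csv_to_list string out) := by unfold Spec_csv_to_list; infer_instance

-- ===== CLAIM (what is proved, stated in full; the proofs are below) =====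
def Claim_equal_csv_to_list : Prop := ∀ (string : String), Dom_csv_to_list string → Spec_csv_to_list string (csv_to_list string)

-- ===== LEMMAS AND PROOFS =====

-- reference split: accumulate the current field, cut at each comma
def mySplit : List Char → List Char → List (List Char)
  | cur, [] => [cur]
  | cur, c :: rest => if c = ',' then cur :: mySplit [] rest else mySplit (cur ++ [c]) rest

lemma mySplit_ne_nil (l : List Char) : ∀ cur, mySplit cur l ≠ [] := by
  induction l with
  | nil => intro cur; simp [mySplit]
  | cons c rest ih =>
    intro cur
    by_cases h : c = ',' <;> simp [mySplit, h]
    exact ih (cur ++ [c])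

lemma slice_one_none (p : List Char) :
    PySem.List.slice p (some 1) none = p.tail :=
  PySem.List.slice_from_one p

lemma slice_one_neg_one (p : List Char) :
    PySem.List.slice p (some 1) (some (-1)) = p.tail.dropLast := by
  cases p with
  | nil => simp [PySem.List.slice, PySem.List.clampIdx]
  | cons c rest =>
    simp [PySem.List.slice, PySem.List.clampIdx, List.dropLast_eq_take]
    split_ifs <;> omega

lemma trimParts_single (p : List Char) :
    trimParts [p] = [String.ofList p.tail.dropLast] := by
  simp [trimParts, slice_one_neg_one]

lemma trimParts_cons (p : List Char) (ps : List (List Char)) (h : ps ≠ []) :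
    trimParts (p :: ps) = String.ofList p.tail :: trimParts ps := by
  cases ps with
  | nil => exact absurd rfl h
  | cons q rest => simp [trimParts, slice_one_none]

lemma go_eq (l : List Char) : ∀ (fuel : Nat) (cur : List Char) (acc : List (List Char)),
    l.length < fuel →
    PySem.Chars.splitOn.go [','] fuel l cur acc = acc.reverse ++ mySplit cur.reverse l := by
  induction l with
  | nil =>
    intro fuel cur acc h
    obtain ⟨m, rfl⟩ : ∃ m, fuel = m + 1 := ⟨fuel - 1, by omega⟩
    rw [PySem.Chars.splitOn.go.eq_def]
    simp [mySplit]
  | cons c rest ih =>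
    intro fuel cur acc h
    obtain ⟨m, rfl⟩ : ∃ m, fuel = m + 1 := ⟨fuel - 1, by omega⟩
    rw [PySem.Chars.splitOn.go.eq_def]
    dsimp only
    by_cases hc : c = ','
    · rw [if_pos (by simp [List.isPrefixOf, hc])]
      have e1 : List.drop ([','].length) (c :: rest) = rest := by simp
      rw [e1, ih m [] (cur.reverse :: acc) (by simp at h ⊢; omega)]
      simp [mySplit, hc]
    · rw [if_neg (by simp [List.isPrefixOf]; exact fun e => hc e.symm)]
      rw [ih m (c :: cur) acc (by simp at h ⊢; omega)]
      simp [mySplit, hc]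

lemma splitOn_eq_mySplit (l : List Char) :
    PySem.Chars.splitOn l [','] = mySplit [] l := by
  have := go_eq l (l.length + 1) [] [] (by omega)
  simpa [PySem.Chars.splitOn] using this

lemma slice_tail (s : List Char) (tl hd : Nat) :
    PySem.List.slice s (some ((tl : Int) + 1)) (some (hd : Int))
      = ((s.drop tl).take (hd - tl)).tail := by
  have h1 : ((tl : Int) + 1) = ((tl + 1 : Nat) : Int) := by push_cast; ring
  rw [h1, PySem.List.slice_natCast, ← List.drop_one, List.drop_take, List.drop_drop]
  congr 1

lemma slice_final (s : List Char) (tl : Nat) :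
    PySem.List.slice s (some ((tl : Int) + 1)) (some ((s.length : Int) - 1))
      = (s.drop (tl + 1)).dropLast := by
  cases s with
  | nil => simp [PySem.List.slice, PySem.List.clampIdx]
  | cons c rest =>
    have h1 : ((tl : Int) + 1) = ((tl + 1 : Nat) : Int) := by push_cast; ring
    have h2 : (((c :: rest).length : Int) - 1) = ((rest.length : Nat) : Int) := by simp
    rw [h1, h2, PySem.List.slice_natCast, List.dropLast_eq_take]
    congr 1
    simp only [List.length_drop, List.length_cons]
    omega

lemma take_extend (s : List Char) (tl hd : Nat) (h1 : tl ≤ hd) (h2 : hd < s.length) :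
    (s.drop tl).take (hd + 1 - tl) = (s.drop tl).take (hd - tl) ++ [s[hd]] := by
  have e1 : hd + 1 - tl = (hd - tl) + 1 := by omega
  rw [e1, List.take_add_one, List.getElem?_drop]
  have e2 : tl + (hd - tl) = hd := by omega
  rw [e2, List.getElem?_eq_getElem h2]
  simp

lemma loop_final (s : List Char) (tl : Nat) (lst : List String) :
    lst ++ [String.ofList (PySem.List.slice s (some ((tl : Int) + 1)) (some ((s.length : Int) - 1)))]
      = lst ++ trimParts (mySplit ((s.drop tl).take (s.length - tl)) (s.drop s.length)) := by
  have hcur : (s.drop tl).take (s.length - tl) = s.drop tl := by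
    apply List.take_of_length_le; simp
  rw [List.drop_length, hcur]
  show _ = lst ++ trimParts [s.drop tl]
  rw [trimParts_single, slice_final, List.tail_drop]

lemma loop_eq (n : Nat) : ∀ (s : List Char) (tl hd : Nat) (lst : List String),
    hd ≤ s.length → tl ≤ hd → s.length - hd ≤ n →
    csvLoop s tl hd lst
      = lst ++ trimParts (mySplit ((s.drop tl).take (hd - tl)) (s.drop hd)) := by
  induction n with
  | zero =>
    intro s tl hd lst h1 h2 h3
    have hlen : hd = s.length := by omega
    subst hlen
    rw [csvLoop, dif_neg (lt_irrefl _)]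
    exact loop_final s tl lst
  | succ n ih =>
    intro s tl hd lst h1 h2 h3
    rw [csvLoop]
    by_cases h : hd < s.length
    · rw [dif_pos h]
      have hdrop : s.drop hd = s[hd] :: s.drop (hd + 1) := List.drop_eq_getElem_cons h
      by_cases hc : s[hd] = ','
      · rw [if_neg (by simp [hc])]
        rw [ih s (hd + 1) (hd + 1) _ (by omega) (le_refl _) (by omega)]
        rw [List.append_assoc]
        congr 1
        have e0 : hd + 1 - (hd + 1) = 0 := by omega
        rw [e0, List.take_zero, hdrop, hc]
        rw [show mySplit ((s.drop tl).take (hd - tl)) (',' :: s.drop (hd + 1))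
              = (s.drop tl).take (hd - tl) :: mySplit [] (s.drop (hd + 1)) by
            simp [mySplit]]
        rw [trimParts_cons _ _ (mySplit_ne_nil _ _), slice_tail]
        simp
      · rw [if_pos (by simp [hc])]
        rw [ih s tl (hd + 1) lst (by omega) (by omega) (by omega)]
        congr 2
        rw [hdrop]
        rw [show mySplit ((s.drop tl).take (hd - tl)) (s[hd] :: s.drop (hd + 1))
              = mySplit ((s.drop tl).take (hd - tl) ++ [s[hd]]) (s.drop (hd + 1)) by
            simp [mySplit, hc]]
        rw [take_extend s tl hd h2 h]
    · rw [dif_neg h]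
      have hlen : hd = s.length := by omega
      subst hlen
      exact loop_final s tl lst

-- ===== VERDICT (by name: the statement is the Claim_ definition above) =====
theorem csv_to_list_spec : Claim_equal_csv_to_list := by
  intro s _
  unfold Spec_csv_to_list csv_to_list csv_to_list_alt
  rw [loop_eq s.toList.length s.toList 0 0 [] (Nat.zero_le _) (Nat.le_refl _) (by omega),
      splitOn_eq_mySplit]
  simp
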